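-- pv_equiv track=rewrite | github.com/adafruit/Adafruit-USB-Serial-RGB-Character-Backpack | lcd.py | diff_text
-- ===== SOURCE A (Python) =====
-- import itertools
-- from collections import defaultdict
--
-- def diff_text(lines1, lines2):
--     """
--     @brief      Diffs the given lists of strings, producing a dict of (x,y):str tuples of the text
--                 from lines2 where they differed. Adjacent differing characters are included
--                 together in the same string. If one list is longer then the other, the shorter list
--                 is padded with empty strings. If one line is longer than its counterpart, the
--                 shorter string is padded with spaces. See unit tests for examples.
--
--     @param      lines1  The first list of strings
--     @param      lines2  The second list of strings (this one takes priority)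
--
--     @return     A dict of (x,y):str tuples representing changes from lines1 to lines2
--     """
--     diff = defaultdict(lambda: [])  # List of chars is more efficient for building up
--     for y, (line1, line2) in enumerate(itertools.zip_longest(lines1, lines2, fillvalue='')):
--         pos = None
--         for x, (c1, c2) in enumerate(itertools.zip_longest(line1, line2, fillvalue=' ')):
--             if c1 != c2:
--                 if pos is None:
--                     pos = (x, y)
--                 diff[pos].append(c2)
--             else:
--                 pos = None
--     return {k: ''.join(v) for k, v in diff.items()}
-- ===== SOURCE B (Python) =====
-- import itertools
--
-- def diff_text(lines1, lines2):
--     # Two-phase per line: first collect the differing columns, then merge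
--     # consecutive columns into runs and build the dict from the run list.
--     entries = []
--     for y, (line1, line2) in enumerate(itertools.zip_longest(lines1, lines2, fillvalue='')):
--         bad = [(x, c2) for x, (c1, c2) in
--                enumerate(itertools.zip_longest(line1, line2, fillvalue=' '))
--                if c1 != c2]
--         runs = []
--         for x, c in bad:
--             if runs and runs[-1][0] + len(runs[-1][1]) == x:
--                 runs[-1] = (runs[-1][0], runs[-1][1] + [c])
--             else:
--                 runs.append((x, [c]))
--         for s, chars in runs:
--             entries.append(((s, y), ''.join(chars)))
--     return dict(entries)
-- ===== Notes on version B (the rewrite author's own statement) =====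
-- stated objective: alternative
-- what changed: A threads an Optional pos sentinel through one pass, appending characters into a defaultdict of char lists keyed by the live run start and joining at the end; B instead works per line in two phases — first collect the differing columns, then merge consecutive columns into an explicit run list and build the plain result dict once from the run entries.
import Mathlib
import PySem

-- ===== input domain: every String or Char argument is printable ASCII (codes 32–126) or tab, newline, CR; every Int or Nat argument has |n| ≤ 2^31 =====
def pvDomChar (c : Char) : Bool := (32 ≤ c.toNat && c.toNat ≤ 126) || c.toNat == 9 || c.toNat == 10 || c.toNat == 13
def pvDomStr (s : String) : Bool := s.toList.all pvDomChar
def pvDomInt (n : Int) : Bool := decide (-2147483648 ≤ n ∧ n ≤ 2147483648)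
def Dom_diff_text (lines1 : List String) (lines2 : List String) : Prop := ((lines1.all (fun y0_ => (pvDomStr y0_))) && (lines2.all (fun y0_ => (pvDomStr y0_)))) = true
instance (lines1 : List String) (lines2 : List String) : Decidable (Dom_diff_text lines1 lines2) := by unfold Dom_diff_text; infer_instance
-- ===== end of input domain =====

-- B replaces A's stateful pos-sentinel/defaultdict scan by a two-phase per-line pass
-- (collect differing columns, then merge consecutive columns into runs) — objective: alternative.

-- itertools.zip_longest(xs, ys, fillvalue=fill) for two sequences (hand port, exact: pads the
-- shorter list with fill); used by both Pythons with the same calls.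
def pvZipL {α : Type} (fill : α) : List α → List α → List (α × α)
  | [], [] => []
  | [], b :: bs => (fill, b) :: pvZipL fill [] bs
  | a :: as, [] => (a, fill) :: pvZipL fill as []
  | a :: as, b :: bs => (a, b) :: pvZipL fill as bs

-- ===== PORT A =====
-- one iteration of A's inner loop: state = (pos, diff); diff[pos].append(c2) is modify pos [] (· ++ [c2])
def pvStepA (y : Int) (st : Option (Int × Int) × PySem.Dict (Int × Int) (List Char))
    (xp : Int × Char × Char) : Option (Int × Int) × PySem.Dict (Int × Int) (List Char) :=
  if xp.2.1 ≠ xp.2.2 then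
    let pos := st.1.getD (xp.1, y)
    (some pos, PySem.Dict.modify st.2 pos [] (fun v => v ++ [xp.2.2]))
  else
    (none, st.2)

def pvLineA (y : Int) (line1 line2 : String) (d : PySem.Dict (Int × Int) (List Char)) :
    PySem.Dict (Int × Int) (List Char) :=
  ((PySem.List.enumerate (pvZipL ' ' line1.toList line2.toList)).foldl (pvStepA y) (none, d)).2

-- ''.join over a list of single characters is String.ofList (exact)
def diff_text (lines1 : List String) (lines2 : List String) : List (Int × Int × String) :=
  let diff := (PySem.List.enumerate (pvZipL "" lines1 lines2)).foldl
      (fun d yp => pvLineA yp.1 yp.2.1 yp.2.2 d) PySem.Dict.empty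
  (PySem.Dict.ofList (diff.items.map (fun kv => (kv.1, String.ofList kv.2)))).items.map
      (fun kv => (kv.1.1, kv.1.2, kv.2))

-- ===== PORT B =====
-- bad = [(x, c2) for x, (c1, c2) in enumerate(zip_longest(line1, line2, ' ')) if c1 != c2]
def pvBad (cps : List (Char × Char)) : List (Int × Char) :=
  (PySem.List.enumerate cps).filterMap
    (fun xp => if xp.2.1 ≠ xp.2.2 then some (xp.1, xp.2.2) else none)

-- one iteration of B's run-merging loop over bad
def pvStepB (runs : List (Int × List Char)) (p : Int × Char) : List (Int × List Char) :=
  match runs.getLast? with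
  | some r =>
      if r.1 + (r.2.length : Int) = p.1 then runs.dropLast ++ [(r.1, r.2 ++ [p.2])]
      else runs ++ [(p.1, [p.2])]
  | none => [(p.1, [p.2])]

def pvLineB (y : Int) (line1 line2 : String) : List ((Int × Int) × String) :=
  ((pvBad (pvZipL ' ' line1.toList line2.toList)).foldl pvStepB []).map
    (fun r => ((r.1, y), String.ofList r.2))

def diff_text_alt (lines1 : List String) (lines2 : List String) : List (Int × Int × String) :=
  let entries := (PySem.List.enumerate (pvZipL "" lines1 lines2)).foldl
      (fun acc yp => acc ++ pvLineB yp.1 yp.2.1 yp.2.2) []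
  (PySem.Dict.ofList entries).items.map (fun kv => (kv.1.1, kv.1.2, kv.2))

-- ===== PRECONDITION & SPEC =====
def Spec_diff_text (lines1 : List String) (lines2 : List String) (out : List (Int × Int × String)) : Prop := out = diff_text_alt lines1 lines2
instance (lines1 : List String) (lines2 : List String) (out : List (Int × Int × String)) : Decidable (Spec_diff_text lines1 lines2 out) := by unfold Spec_diff_text; infer_instance

-- ===== CLAIM (what is proved, stated in full; the proofs are below) =====
def Claim_equal_diff_text : Prop := ∀ (lines1 : List String) (lines2 : List String), Dom_diff_text lines1 lines2 → Spec_diff_text lines1 lines2 (diff_text lines1 lines2)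

-- ===== LEMMAS AND PROOFS =====

-- A's pos as a function of B's runs and the next column index n:
-- pos is live exactly when the last run ends at n
def pvPosOf (y : Int) (runs : List (Int × List Char)) (n : Int) : Option (Int × Int) :=
  match runs.getLast? with
  | some r => if r.1 + (r.2.length : Int) = n then some (r.1, y) else none
  | none => none

theorem pvGet?_mk_fresh {κ ν : Type} [BEq κ] [LawfulBEq κ] (l : List (κ × ν)) (k : κ)
    (h : ∀ p ∈ l, p.1 ≠ k) : (PySem.Dict.mk l).get? k = none := by
  induction l with
  | nil => rfl
  | cons p l ih =>
      rw [show PySem.Dict.mk (p :: l) = PySem.Dict.mk ((p.1, p.2) :: l) by rfl,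
        PySem.Dict.get?_mk_cons]
      have hp : p.1 ≠ k := h p (List.mem_cons_self ..)
      simp only [beq_eq_false_iff_ne.mpr hp]
      exact ih (fun q hq => h q (List.mem_cons_of_mem _ hq))

theorem pvGet?_mk_last {κ ν : Type} [BEq κ] [LawfulBEq κ] (pre : List (κ × ν)) (k : κ) (v : ν)
    (h : ∀ p ∈ pre, p.1 ≠ k) : (PySem.Dict.mk (pre ++ [(k, v)])).get? k = some v := by
  induction pre with
  | nil =>
      rw [List.nil_append, PySem.Dict.get?_mk_cons]
      simp
  | cons p pre ih =>
      rw [List.cons_append, show PySem.Dict.mk ((p :: (pre ++ [(k,v)])) ) = PySem.Dict.mk ((p.1, p.2) :: (pre ++ [(k,v)])) by rfl,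
        PySem.Dict.get?_mk_cons]
      have hp : p.1 ≠ k := h p (List.mem_cons_self ..)
      simp only [beq_eq_false_iff_ne.mpr hp]
      exact ih (fun q hq => h q (List.mem_cons_of_mem _ hq))

-- fresh-key modify appends (defaultdict creating a new entry)
theorem pvModify_mk_fresh (l : List ((Int × Int) × List Char)) (k : Int × Int) (c : Char)
    (h : ∀ p ∈ l, p.1 ≠ k) :
    (PySem.Dict.modify (PySem.Dict.mk l) k [] (fun v => v ++ [c])).items = l ++ [(k, [c])] := by
  have hg := pvGet?_mk_fresh l k h
  have hc : (PySem.Dict.mk l).contains k = false := by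
    rw [PySem.Dict.contains_eq_isSome_get?, hg]; rfl
  have hd : (PySem.Dict.mk l).getD k ([] : List Char) = [] := by
    rw [PySem.Dict.getD_eq_get?_getD, hg]; rfl
  simp only [PySem.Dict.modify, hd]
  rw [PySem.Dict.items_insert_of_not_contains _ _ hc]
  rfl

-- modify at the run key in tail position updates the tail entry in place
theorem pvModify_mk_last (pre : List ((Int × Int) × List Char)) (k : Int × Int) (v : List Char) (c : Char)
    (h : ∀ p ∈ pre, p.1 ≠ k) :
    (PySem.Dict.modify (PySem.Dict.mk (pre ++ [(k, v)])) k [] (fun w => w ++ [c])).items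
      = pre ++ [(k, v ++ [c])] := by
  have hg := pvGet?_mk_last pre k v h
  have hc : (PySem.Dict.mk (pre ++ [(k, v)])).contains k = true := by
    rw [PySem.Dict.contains_eq_isSome_get?, hg]; rfl
  have hd : (PySem.Dict.mk (pre ++ [(k, v)])).getD k ([] : List Char) = v := by
    rw [PySem.Dict.getD_eq_get?_getD, hg]; rfl
  simp only [PySem.Dict.modify, hd]
  rw [PySem.Dict.items_insert_of_contains _ _ hc, List.map_append]
  congr 1
  · rw [List.map_congr_left (g := id) (fun p hp => by
      simp [beq_eq_false_iff_ne.mpr (h p hp)]), List.map_id]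
  · simp

-- the inner loops: A's fold over the enumerated character pairs, started mid-line with
-- B's runs as the dict suffix, equals B's run-merging fold over the remaining bad columns
theorem pvInner (y : Int) (cs : List (Char × Char)) :
    ∀ (n : Int) (runs : List (Int × List Char)) (base : List ((Int × Int) × List Char)),
    (∀ p ∈ base, p.1.2 ≠ y) →
    (∀ r ∈ runs, r.2 ≠ [] ∧ r.1 + (r.2.length : Int) ≤ n) →
    ((runs.map (·.1)).Nodup) →
    (((PySem.List.enumerate cs n).foldl (pvStepA y)
        (pvPosOf y runs n, PySem.Dict.mk (base ++ runs.map (fun r => ((r.1, y), r.2))))).2).items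
      = base ++ (((PySem.List.enumerate cs n).filterMap
            (fun xp => if xp.2.1 ≠ xp.2.2 then some (xp.1, xp.2.2) else none)).foldl pvStepB runs).map
          (fun r => ((r.1, y), r.2)) := by
  induction cs with
  | nil => intro n runs base _ _ _; rfl
  | cons cc cs ih =>
    intro n runs base hbase hruns hnd
    obtain ⟨c1, c2⟩ := cc
    rw [PySem.List.enumerate_cons]
    simp only [List.foldl_cons]
    by_cases hc : c1 = c2
    · -- equal characters: A resets pos, B skips the column
      have hstep : pvStepA y
          (pvPosOf y runs n, PySem.Dict.mk (base ++ runs.map (fun r => ((r.1, y), r.2)))) (n, c1, c2)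
          = (none, PySem.Dict.mk (base ++ runs.map (fun r => ((r.1, y), r.2)))) := by
        simp [pvStepA, hc]
      have hpos : pvPosOf y runs (n + 1) = none := by
        unfold pvPosOf
        cases hL : runs.getLast? with
        | none => rfl
        | some r =>
            have hr := hruns r (List.mem_of_getLast? hL)
            simp only
            rw [if_neg (by omega)]
      have hfm : List.filterMap
          (fun xp : Int × Char × Char => if xp.2.1 ≠ xp.2.2 then some (xp.1, xp.2.2) else none)
          ((n, c1, c2) :: PySem.List.enumerate cs (n + 1))
          = List.filterMap
            (fun xp : Int × Char × Char => if xp.2.1 ≠ xp.2.2 then some (xp.1, xp.2.2) else none)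
            (PySem.List.enumerate cs (n + 1)) := by
        rw [List.filterMap_cons]; simp [hc]
      rw [hstep, hfm]
      rw [show (none : Option (Int × Int)) = pvPosOf y runs (n + 1) from hpos.symm]
      exact ih (n + 1) runs base hbase
        (fun r hr => ⟨(hruns r hr).1, by have := (hruns r hr).2; omega⟩) hnd
    · -- differing characters
      have hfm : List.filterMap
          (fun xp : Int × Char × Char => if xp.2.1 ≠ xp.2.2 then some (xp.1, xp.2.2) else none)
          ((n, c1, c2) :: PySem.List.enumerate cs (n + 1))
          = (n, c2) :: List.filterMap
            (fun xp : Int × Char × Char => if xp.2.1 ≠ xp.2.2 then some (xp.1, xp.2.2) else none)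
            (PySem.List.enumerate cs (n + 1)) := by
        rw [List.filterMap_cons]; simp [hc]
      rw [hfm, List.foldl_cons]
      cases hL : runs.getLast? with
      | none =>
          have hrnil : runs = [] := List.getLast?_eq_none_iff.mp hL
          subst hrnil
          have hfresh : ∀ p ∈ base, p.1 ≠ ((n : Int), y) := by
            intro p hp hcon
            exact hbase p hp (by rw [hcon])
          have hstep : pvStepA y
              (pvPosOf y [] n, PySem.Dict.mk (base ++ List.map (fun r => ((r.1, y), r.2)) ([] : List (Int × List Char)))) (n, c1, c2)
              = (some (n, y), PySem.Dict.mk (base ++ [((n, y), [c2])])) := by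
            simp only [pvStepA, if_pos hc, List.map_nil, List.append_nil]
            refine Prod.ext rfl (PySem.Dict.ext ?_)
            exact pvModify_mk_fresh base (n, y) c2 hfresh
          rw [hstep]
          have hpos : (some ((n : Int), y)) = pvPosOf y [(n, [c2])] (n + 1) := by
            unfold pvPosOf; simp
          rw [hpos, show pvStepB [] (n, c2) = [(n, [c2])] from rfl]
          have := ih (n + 1) [(n, [c2])] base hbase
            (by intro r hr; simp at hr; subst hr; exact ⟨by simp, by simp⟩)
            (by simp)
          simpa using this
      | some r =>
          have hr := hruns r (List.mem_of_getLast? hL)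
          obtain ⟨init, hri⟩ := List.getLast?_eq_some_iff.mp hL
          subst hri
          have hlen : (1 : Int) ≤ r.2.length := by
            have := List.length_pos_iff.mpr hr.1
            omega
          by_cases hE : r.1 + (r.2.length : Int) = n
          · -- pos is live: A appends to the run's dict entry, B extends the last run
            have hposn : pvPosOf y (init ++ [r]) n = some (r.1, y) := by
              unfold pvPosOf
              rw [List.getLast?_concat]
              simp only
              rw [if_pos hE]
            have hndinit : r.1 ∉ init.map (·.1) := by
              intro hmem
              rw [List.map_append] at hnd
              rcases List.nodup_append.mp hnd with ⟨-, -, hdisj⟩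
              exact hdisj r.1 hmem r.1 (List.mem_map_of_mem (List.mem_singleton_self _)) rfl
            have hfresh : ∀ p ∈ base ++ init.map (fun r => ((r.1, y), r.2)), p.1 ≠ (r.1, y) := by
              intro p hp
              rcases List.mem_append.mp hp with hp | hp
              · intro hcon; exact hbase p hp (by rw [hcon])
              · obtain ⟨q, hq, rfl⟩ := List.mem_map.mp hp
                intro hcon
                apply hndinit
                have hq1 : q.1 = r.1 := by simpa using hcon
                exact hq1 ▸ List.mem_map_of_mem hq
            have hstep : pvStepA y
                (pvPosOf y (init ++ [r]) n,
                 PySem.Dict.mk (base ++ List.map (fun r => ((r.1, y), r.2)) (init ++ [r]))) (n, c1, c2)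
                = (some (r.1, y),
                   PySem.Dict.mk (base ++ List.map (fun r => ((r.1, y), r.2)) (init ++ [(r.1, r.2 ++ [c2])]))) := by
              rw [hposn]
              simp only [pvStepA, if_pos hc, Option.getD_some]
              refine Prod.ext rfl (PySem.Dict.ext ?_)
              have := pvModify_mk_last (base ++ init.map (fun r => ((r.1, y), r.2))) (r.1, y) r.2 c2 hfresh
              simp only [List.map_append, List.map_cons, List.map_nil, ← List.append_assoc] at *
              exact this
            rw [hstep]
            have hstepB : pvStepB (init ++ [r]) (n, c2) = init ++ [(r.1, r.2 ++ [c2])] := by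
              unfold pvStepB
              rw [List.getLast?_concat]
              simp only [if_pos hE, List.dropLast_concat]
            rw [hstepB]
            have hpos1 : (some (r.1, y)) = pvPosOf y (init ++ [(r.1, r.2 ++ [c2])]) (n + 1) := by
              unfold pvPosOf
              rw [List.getLast?_concat]
              simp only [List.length_append, List.length_cons, List.length_nil]
              rw [if_pos (by push_cast; omega)]
            rw [hpos1]
            refine ih (n + 1) (init ++ [(r.1, r.2 ++ [c2])]) base hbase ?_ ?_
            · intro q hq
              rcases List.mem_append.mp hq with hq | hq
              · have := hruns q (List.mem_append_left _ hq)
                exact ⟨this.1, by omega⟩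
              · simp at hq; subst hq
                refine ⟨by simp, ?_⟩
                simp only [List.length_append, List.length_cons, List.length_nil]
                push_cast; omega
            · have : (init ++ [(r.1, r.2 ++ [c2])]).map (·.1) = (init ++ [r]).map (·.1) := by
                simp
              rw [this]; exact hnd
          · -- pos is dead: both start a fresh run at column n
            have hposn : pvPosOf y (init ++ [r]) n = none := by
              unfold pvPosOf
              rw [List.getLast?_concat]
              simp only
              rw [if_neg hE]
            have hfresh : ∀ p ∈ base ++ (init ++ [r]).map (fun r => ((r.1, y), r.2)), p.1 ≠ ((n : Int), y) := by
              intro p hp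
              rcases List.mem_append.mp hp with hp | hp
              · intro hcon; exact hbase p hp (by rw [hcon])
              · obtain ⟨q, hq, rfl⟩ := List.mem_map.mp hp
                have hq' := hruns q hq
                have hq2 : (1 : Int) ≤ q.2.length := by
                  have := List.length_pos_iff.mpr hq'.1
                  omega
                intro hcon
                have hq1 : q.1 = n := by simpa using hcon
                have := hq'.2
                omega
            have hstep : pvStepA y
                (pvPosOf y (init ++ [r]) n,
                 PySem.Dict.mk (base ++ List.map (fun r => ((r.1, y), r.2)) (init ++ [r]))) (n, c1, c2)
                = (some (n, y),
                   PySem.Dict.mk (base ++ List.map (fun r => ((r.1, y), r.2)) ((init ++ [r]) ++ [(n, [c2])]))) := by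
              rw [hposn]
              simp only [pvStepA, if_pos hc, Option.getD_none]
              refine Prod.ext rfl (PySem.Dict.ext ?_)
              have := pvModify_mk_fresh (base ++ (init ++ [r]).map (fun r => ((r.1, y), r.2))) (n, y) c2 hfresh
              simp only [List.map_append, List.map_cons, List.map_nil, ← List.append_assoc] at *
              exact this
            rw [hstep]
            have hstepB : pvStepB (init ++ [r]) (n, c2) = (init ++ [r]) ++ [(n, [c2])] := by
              unfold pvStepB
              rw [List.getLast?_concat]
              simp only [if_neg hE]
            rw [hstepB]
            have hpos1 : (some ((n : Int), y)) = pvPosOf y ((init ++ [r]) ++ [(n, [c2])]) (n + 1) := by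
              unfold pvPosOf
              rw [List.getLast?_concat]
              simp
            rw [hpos1]
            refine ih (n + 1) ((init ++ [r]) ++ [(n, [c2])]) base hbase ?_ ?_
            · intro q hq
              rcases List.mem_append.mp hq with hq | hq
              · have := hruns q hq
                exact ⟨this.1, by omega⟩
              · simp at hq; subst hq
                exact ⟨by simp, by simp⟩
            · rw [List.map_append]
              refine List.Nodup.append hnd (by simp) ?_
              intro a ha hb
              simp at hb
              obtain ⟨q, hq, rfl⟩ := List.mem_map.mp ha
              have hq' := hruns q hq
              have : (1 : Int) ≤ q.2.length := by
                have := List.length_pos_iff.mpr hq'.1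
                omega
              have := hq'.2
              omega

-- the outer loops in lockstep
theorem pvOuter (lps : List (String × String)) :
    ∀ (y0 : Int) (items0 : List ((Int × Int) × List Char)),
    (∀ p ∈ items0, p.1.2 < y0) →
    ((PySem.List.enumerate lps y0).foldl (fun d yp => pvLineA yp.1 yp.2.1 yp.2.2 d)
        (PySem.Dict.mk items0)).items.map (fun kv => (kv.1, String.ofList kv.2))
      = (PySem.List.enumerate lps y0).foldl (fun acc yp => acc ++ pvLineB yp.1 yp.2.1 yp.2.2)
          (items0.map (fun kv => (kv.1, String.ofList kv.2))) := by
  induction lps with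
  | nil => intro y0 items0 _; rfl
  | cons lp lps ih =>
    intro y0 items0 h0
    obtain ⟨l1, l2⟩ := lp
    rw [PySem.List.enumerate_cons]
    simp only [List.foldl_cons]
    have hline : pvLineA y0 l1 l2 (PySem.Dict.mk items0)
        = PySem.Dict.mk (items0 ++
            ((pvBad (pvZipL ' ' l1.toList l2.toList)).foldl pvStepB []).map
              (fun r => ((r.1, y0), r.2))) := by
      apply PySem.Dict.ext
      have h := pvInner y0 (pvZipL ' ' l1.toList l2.toList) 0 []
        items0 (fun p hp => by have := h0 p hp; omega)
        (by intro r hr; cases hr) (by simp)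
      simpa [pvLineA, pvBad, pvPosOf] using h
    rw [hline]
    have h1 : ∀ p ∈ items0 ++
        ((pvBad (pvZipL ' ' l1.toList l2.toList)).foldl pvStepB []).map
          (fun r => ((r.1, y0), r.2)), p.1.2 < y0 + 1 := by
      intro p hp
      rcases List.mem_append.mp hp with hp | hp
      · have := h0 p hp; omega
      · obtain ⟨q, hq, rfl⟩ := List.mem_map.mp hp
        simp
    rw [ih (y0 + 1) _ h1, List.map_append]
    congr 1
    unfold pvLineB
    rw [List.map_map]
    rfl

-- ===== VERDICT (by name: the statement is the Claim_ definition above) =====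
theorem diff_text_spec : Claim_equal_diff_text := by
  intro lines1 lines2 _
  unfold Spec_diff_text diff_text diff_text_alt
  dsimp only
  have h := pvOuter (pvZipL "" lines1 lines2) 0 [] (by intro p hp; cases hp)
  simp only [List.map_nil] at h
  rw [show (PySem.Dict.empty : PySem.Dict (Int × Int) (List Char))
      = PySem.Dict.mk [] from rfl, h]
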